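-- pv_equiv track=rewrite | github.com/olivia-rippee/Python-for-Computational-Biology-and-Bioinformatics | Bioinformatics III - Comparing Genes, Proteins, and Genomes/4 Genome Rearrangements and Fragility.py | BlackEdges
-- ===== SOURCE A (Python) =====
-- def ChromosomeToCycle(chromosome):
--     nodes = []
--     for block in chromosome:
--         if block > 0:
--             nodes.extend([2*block - 1, 2*block])
--         else:
--             block = -block
--             nodes.extend([2*block, 2*block - 1])
--     return nodes
--
-- def BlackEdges(P):
--     edges = []
--     for chromosome in P:
--         nodes = ChromosomeToCycle(chromosome)
--         length = len(nodes)
--         for j in range(0, length, 2):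
--             edge = (nodes[j+1], nodes[(j+2) % length])
--             edges.append(edge)
--     return edges
-- ===== SOURCE B (Python) =====
-- def _ends(b):
--     return (2*b - 1, 2*b) if b > 0 else (-2*b, -2*b - 1)
--
-- def BlackEdges(P):
--     edges = []
--     for chromosome in P:
--         if not chromosome:
--             continue
--         first_head, prev_tail = _ends(chromosome[0])
--         for b in chromosome[1:]:
--             head, tail = _ends(b)
--             edges.append((prev_tail, head))
--             prev_tail = tail
--         edges.append((prev_tail, first_head))
--     return edges
-- ===== Notes on version B (the rewrite author's own statement) =====
-- stated objective: alternative
-- what changed: B streams each chromosome in one pass with a carried prev_tail and remembered first_head, emitting each (prev_tail, head) edge on the fly and closing the cycle at the end, instead of A's materialised doubled-node list indexed with modular step-2 arithmetic.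
import Mathlib
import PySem

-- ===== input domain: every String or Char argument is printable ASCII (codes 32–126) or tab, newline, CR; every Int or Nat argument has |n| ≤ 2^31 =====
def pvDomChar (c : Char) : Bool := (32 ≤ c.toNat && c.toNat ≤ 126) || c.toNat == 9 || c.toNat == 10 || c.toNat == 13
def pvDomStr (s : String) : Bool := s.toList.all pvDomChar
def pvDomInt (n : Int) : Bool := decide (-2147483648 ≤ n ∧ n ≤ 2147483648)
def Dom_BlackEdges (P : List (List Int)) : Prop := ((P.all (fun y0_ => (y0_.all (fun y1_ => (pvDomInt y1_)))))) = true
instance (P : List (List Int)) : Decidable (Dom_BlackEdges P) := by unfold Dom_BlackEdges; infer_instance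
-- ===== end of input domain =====

-- B streams each chromosome once with a carried prev_tail and remembered first_head, emitting
-- edges on the fly, instead of A's doubled-node list with modular step-2 indexing.

-- ===== PORT A =====
def ChromosomeToCycle (chromosome : List Int) : List Int :=
  chromosome.foldl (fun nodes block =>
    if block > 0 then nodes ++ [2*block - 1, 2*block]
    else nodes ++ [2*(-block), 2*(-block) - 1]) []

-- nodes[j+1] and nodes[(j+2) % length] are always in range when the loop body runs, so pyGetD is exact here
def BlackEdges (P : List (List Int)) : List (Int × Int) :=
  P.foldl (fun edges chromosome =>
    let nodes := ChromosomeToCycle chromosome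
    let length : Int := PySem.List.len nodes
    (PySem.List.pyRange 0 length 2).foldl (fun es j =>
      es ++ [(PySem.List.pyGetD nodes (j+1) 0,
              PySem.List.pyGetD nodes (PySem.Int.mod (j+2) length) 0)]) edges) []

-- ===== PORT B =====
def ends (b : Int) : Int × Int := if b > 0 then (2*b - 1, 2*b) else (-(2*b), -(2*b) - 1)

def BlackEdges_alt (P : List (List Int)) : List (Int × Int) :=
  P.foldl (fun edges chromosome =>
    match chromosome with
    | [] => edges
    | b0 :: rest =>
      let firstHead := (ends b0).1
      let st := rest.foldl (fun (s : List (Int × Int) × Int) b =>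
          (s.1 ++ [(s.2, (ends b).1)], (ends b).2)) (edges, (ends b0).2)
      st.1 ++ [(st.2, firstHead)]) []

-- ===== PRECONDITION & SPEC =====
def Spec_BlackEdges (P : List (List Int)) (out : List (Int × Int)) : Prop := out = BlackEdges_alt P
instance (P : List (List Int)) (out : List (Int × Int)) : Decidable (Spec_BlackEdges P out) := by unfold Spec_BlackEdges; infer_instance

-- ===== CLAIM (what is proved, stated in full; the proofs are below) =====
def Claim_equal_BlackEdges : Prop := ∀ (P : List (List Int)), Dom_BlackEdges P → Spec_BlackEdges P (BlackEdges P)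

-- ===== LEMMAS AND PROOFS =====

def flatP (q : List (Int × Int)) : List Int := q.flatMap (fun p => [p.1, p.2])

lemma ctc_eq (c : List Int) : ChromosomeToCycle c = flatP (c.map ends) := by
  unfold ChromosomeToCycle flatP
  have hfun : (fun (nodes : List Int) (block : Int) =>
      if block > 0 then nodes ++ [2*block - 1, 2*block]
      else nodes ++ [2*(-block), 2*(-block) - 1])
    = (fun nodes block => nodes ++ [(ends block).1, (ends block).2]) := by
    funext nodes block
    by_cases h : block > 0
    · simp [ends, h]
    · simp [ends, h]
  rw [hfun, PySem.List.foldl_append_eq_flatMap (fun block => [(ends block).1, (ends block).2]) c []]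
  simp [List.flatMap_map]

lemma len_flatP (q : List (Int × Int)) : (flatP q).length = 2 * q.length := by
  induction q with
  | nil => rfl
  | cons p q ih => simp [flatP] at ih ⊢; omega

lemma flat_fst (q : List (Int × Int)) (i : Nat) (h : i < q.length)
    (h2 : 2*i < (flatP q).length) : (flatP q)[2*i] = (q.getD i (0,0)).1 := by
  induction q generalizing i with
  | nil => simp at h
  | cons p q ih =>
    cases i with
    | zero => simp [flatP]
    | succ i =>
      have e : 2*(i+1) = ((2*i) + 1) + 1 := by ring
      have h2' : 2*i < (flatP q).length := by
        have := len_flatP q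
        have hh : i < q.length := by simpa using h
        omega
      calc (flatP (p :: q))[2*(i+1)]'(by simpa [e] using h2)
          = (p.1 :: p.2 :: flatP q)[(2*i) + 1 + 1]'(by simp [flatP] at h2 ⊢; omega) := by
            simp only [flatP, List.flatMap_cons, List.cons_append, List.nil_append, e]
        _ = (flatP q)[2*i]'h2' := by simp
        _ = (q.getD i (0,0)).1 := ih i (by simpa using h) h2'

lemma flat_snd (q : List (Int × Int)) (i : Nat) (h : i < q.length)
    (h2 : 2*i+1 < (flatP q).length) : (flatP q)[2*i+1] = (q.getD i (0,0)).2 := by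
  induction q generalizing i with
  | nil => simp at h
  | cons p q ih =>
    cases i with
    | zero => simp [flatP]
    | succ i =>
      have e : 2*(i+1)+1 = ((2*i+1) + 1) + 1 := by ring
      have h2' : 2*i+1 < (flatP q).length := by
        have := len_flatP q
        have hh : i < q.length := by simpa using h
        omega
      calc (flatP (p :: q))[2*(i+1)+1]'(by simpa [e] using h2)
          = (p.1 :: p.2 :: flatP q)[(2*i+1) + 1 + 1]'(by simp [flatP] at h2 ⊢; omega) := by
            simp only [flatP, List.flatMap_cons, List.cons_append, List.nil_append, e]
        _ = (flatP q)[2*i+1]'h2' := by simp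
        _ = (q.getD i (0,0)).2 := ih i (by simpa using h) h2'

-- the per-chromosome edge list of A, stated over the endpoint-pair list
def edgesOf (q : List (Int × Int)) : List (Int × Int) :=
  (List.range q.length).map (fun k => ((q.getD k (0,0)).2, (q.getD ((k+1) % q.length) (0,0)).1))

lemma mod_wrap (k n : Nat) (hk : k < n) :
    PySem.Int.mod ((2*(k:Int)) + 2) (2*(n:Int)) = 2 * (((k+1) % n : Nat) : Int) := by
  have hpos : (0:Int) < 2*(n:Int) := by omega
  rw [PySem.Int.mod_eq_emod_of_pos hpos]
  rcases Nat.lt_or_ge (k+1) n with h | h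
  · rw [Int.emod_eq_of_lt (by omega) (by omega)]
    rw [Nat.mod_eq_of_lt h]
    push_cast
    ring
  · have : k + 1 = n := by omega
    subst this
    have : (2*(k:Int)) + 2 = 2*((k:Int)+1) := by ring
    rw [this]
    simp [Nat.mod_self]

lemma mapA_eq (q : List (Int × Int)) :
    (PySem.List.pyRange 0 (PySem.List.len (flatP q)) 2).map (fun j =>
      (PySem.List.pyGetD (flatP q) (j+1) 0,
       PySem.List.pyGetD (flatP q) (PySem.Int.mod (j+2) (PySem.List.len (flatP q))) 0))
    = edgesOf q := by
  rcases Nat.eq_zero_or_pos q.length with hq | hq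
  · have : q = [] := List.length_eq_zero_iff.mp hq
    subst this
    simp [flatP, edgesOf, PySem.List.pyRange, PySem.List.len]
  · have hlen : (flatP q).length = 2 * q.length := len_flatP q
    have hlen' : PySem.List.len (flatP q) = 2 * (q.length : Int) := by
      simp [PySem.List.len_eq, hlen]
    rw [hlen', PySem.List.pyRange_of_pos 0 (2 * (q.length:Int)) (by norm_num)]
    have hpos : (0:Int) < 2 * (q.length:Int) := by omega
    have hcnt : (if (0:Int) < 2 * (q.length:Int) then ((2 * (q.length:Int) - 0 + 2 - 1) / 2).toNat else 0) = q.length := by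
      rw [if_pos hpos]; omega
    rw [hcnt, List.map_map]
    unfold edgesOf
    apply List.map_congr_left
    intro k hk
    have hk' : k < q.length := List.mem_range.mp hk
    have hA : (0:Int) + 2*(k:Int) + 1 = ((2*k+1 : Nat) : Int) := by push_cast; ring
    have hB : (0:Int) + 2*(k:Int) + 2 = (2*(k:Int)) + 2 := by ring
    simp only [Function.comp_apply, hA, hB, Prod.mk.injEq]
    constructor
    · rw [PySem.List.pyGetD_natCast]
      rw [List.getD_eq_getElem _ _ (by omega)]
      exact flat_snd q k hk' (by omega)
    · rw [mod_wrap k q.length hk']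
      have : (2 * (((k+1) % q.length : Nat) : Int)) = ((2 * ((k+1) % q.length) : Nat) : Int) := by push_cast; ring
      rw [this, PySem.List.pyGetD_natCast]
      have hm : (k+1) % q.length < q.length := Nat.mod_lt _ hq
      rw [List.getD_eq_getElem _ _ (by omega)]
      exact flat_fst q ((k+1) % q.length) hm (by omega)

-- streaming edge list: what B's inner loop produces, over the pair list
def streamE (fh pt : Int) : List (Int × Int) → List (Int × Int)
  | [] => [(pt, fh)]
  | p :: ps => (pt, p.1) :: streamE fh p.2 ps

lemma foldB_eq (rest : List Int) (fh : Int) : ∀ (es : List (Int × Int)) (pt : Int),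
    (rest.foldl (fun (s : List (Int × Int) × Int) b =>
        (s.1 ++ [(s.2, (ends b).1)], (ends b).2)) (es, pt)).1
    ++ [((rest.foldl (fun (s : List (Int × Int) × Int) b =>
        (s.1 ++ [(s.2, (ends b).1)], (ends b).2)) (es, pt)).2, fh)]
    = es ++ streamE fh pt (rest.map ends) := by
  induction rest with
  | nil => intro es pt; simp [streamE]
  | cons b rs ih =>
    intro es pt
    simp only [List.foldl_cons, List.map_cons]
    rw [ih (es ++ [(pt, (ends b).1)]) (ends b).2]
    simp [streamE]

lemma streamE_zip (qs : List (Int × Int)) : ∀ (fh pt : Int),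
    streamE fh pt qs = (pt :: qs.map Prod.snd).zip (qs.map Prod.fst ++ [fh]) := by
  induction qs with
  | nil => intro fh pt; simp [streamE]
  | cons p ps ih => intro fh pt; simp [streamE, ih]

lemma edgesOf_cons (p : Int × Int) (qs : List (Int × Int)) :
    edgesOf (p :: qs) = (p.2 :: qs.map Prod.snd).zip (qs.map Prod.fst ++ [p.1]) := by
  apply List.ext_getElem
  · simp [edgesOf]
  · intro k h1 h2
    have hn : (p :: qs).length = qs.length + 1 := by simp
    have hk : k < qs.length + 1 := by simpa [edgesOf] using h1
    unfold edgesOf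
    rw [List.getElem_map, List.getElem_range, List.getElem_zip]
    have e2 : (p.2 :: qs.map Prod.snd)[k]'(by simp; omega) = ((p :: qs)[k]'(by simp; omega)).2 := by
      cases k with
      | zero => simp
      | succ i => simp
    rw [e2, List.getD_eq_getElem _ _ (by simp; omega)]
    rcases Nat.lt_or_ge k qs.length with h | h
    · have hm : (k+1) % (p :: qs).length = k + 1 := by
        rw [hn]; exact Nat.mod_eq_of_lt (by omega)
      rw [hm, List.getD_eq_getElem _ _ (by simp; omega)]
      have e3 : (qs.map Prod.fst ++ [p.1])[k]'(by simp; omega) = ((p :: qs)[k+1]'(by simp; omega)).1 := by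
        rw [List.getElem_append_left (by simpa using h)]
        simp
      rw [e3]
    · have hkeq : k = qs.length := by omega
      subst hkeq
      have hm : (qs.length + 1) % (p :: qs).length = 0 := by rw [hn]; simp
      rw [hm, List.getD_eq_getElem _ _ (by simp)]
      have e3 : (qs.map Prod.fst ++ [p.1])[qs.length]'(by simp) = p.1 := by
        rw [List.getElem_append_right (by simp)]
        simp
      rw [e3]
      simp

lemma step_eq :
    (fun (edges : List (Int × Int)) (chromosome : List Int) =>
      let nodes := ChromosomeToCycle chromosome
      let length : Int := PySem.List.len nodes
      (PySem.List.pyRange 0 length 2).foldl (fun es j =>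
        es ++ [(PySem.List.pyGetD nodes (j+1) 0,
                PySem.List.pyGetD nodes (PySem.Int.mod (j+2) length) 0)]) edges)
    = (fun (edges : List (Int × Int)) (chromosome : List Int) =>
      match chromosome with
      | [] => edges
      | b0 :: rest =>
        let firstHead := (ends b0).1
        let st := rest.foldl (fun (s : List (Int × Int) × Int) b =>
            (s.1 ++ [(s.2, (ends b).1)], (ends b).2)) (edges, (ends b0).2)
        st.1 ++ [(st.2, firstHead)]) := by
  funext edges chromosome
  have hA : (PySem.List.pyRange 0 (PySem.List.len (ChromosomeToCycle chromosome)) 2).foldl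
      (fun es j =>
        es ++ [(PySem.List.pyGetD (ChromosomeToCycle chromosome) (j+1) 0,
                PySem.List.pyGetD (ChromosomeToCycle chromosome)
                  (PySem.Int.mod (j+2) (PySem.List.len (ChromosomeToCycle chromosome))) 0)]) edges
      = edges ++ edgesOf (chromosome.map ends) := by
    rw [PySem.List.foldl_append_singleton_eq_map, ctc_eq, mapA_eq]
  cases chromosome with
  | nil =>
    simpa [edgesOf] using hA
  | cons b0 rest =>
    show _ = (rest.foldl (fun (s : List (Int × Int) × Int) b =>
            (s.1 ++ [(s.2, (ends b).1)], (ends b).2)) (edges, (ends b0).2)).1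
        ++ [((rest.foldl (fun (s : List (Int × Int) × Int) b =>
            (s.1 ++ [(s.2, (ends b).1)], (ends b).2)) (edges, (ends b0).2)).2, (ends b0).1)]
    rw [foldB_eq rest (ends b0).1 edges (ends b0).2, streamE_zip]
    rw [show (b0 :: rest).map ends = ends b0 :: rest.map ends from rfl] at hA
    rw [edgesOf_cons] at hA
    exact hA

-- ===== VERDICT (by name: the statement is the Claim_ definition above) =====
theorem BlackEdges_spec : Claim_equal_BlackEdges := by
  intro P _
  unfold Spec_BlackEdges BlackEdges BlackEdges_alt
  rw [step_eq]
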